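-- pv_equiv track=rewrite | github.com/powerof3/MainMenuVideo | scripts/core/ghidra_import_gen.py | _type_str_size
-- ===== SOURCE A (Python) =====
-- def _type_str_size(type_str: str) -> int:
--     """Estimate byte size from a pipeline type descriptor string."""
--     sizes = {
--         'bool': 1, 'i8': 1, 'u8': 1,
--         'i16': 2, 'u16': 2,
--         'i32': 4, 'u32': 4, 'f32': 4,
--         'i64': 8, 'u64': 8, 'f64': 8,
--         'ptr': 8, 'void': 0,
--     }
--     if type_str in sizes:
--         return sizes[type_str]
--     if type_str.startswith('bytes:'):
--         return int(type_str[6:])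
--     if type_str.startswith('arr:'):
--         rest = type_str[4:]
--         last = rest.rfind(':')
--         if last >= 0 and rest[last+1:].isdigit():
--             count = int(rest[last+1:])
--             elem_size = _type_str_size(rest[:last])
--             return elem_size * count
--         return 0
--     if type_str.startswith('enum:'):
--         return 4
--     if type_str.startswith('struct:'):
--         return 8
--     return 0
-- ===== SOURCE B (Python) =====
-- def _type_str_size(type_str: str) -> int:
--     """Estimate byte size from a pipeline type descriptor string."""
--     toks = type_str.split(':')
--     n = len(toks)
--     d = 0
--     while d < n and toks[d] == 'arr':
--         d += 1
--     if 2 * d > n: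
--         return 0
--     mult = 1
--     for t in toks[n - d:]:
--         if not t.isdigit():
--             return 0
--         mult *= int(t)
--     mid = toks[d:n - d]
--     if len(mid) == 1:
--         t = mid[0]
--         if t in ('bool', 'i8', 'u8'):
--             leaf = 1
--         elif t in ('i16', 'u16'):
--             leaf = 2
--         elif t in ('i32', 'u32', 'f32'):
--             leaf = 4
--         elif t in ('i64', 'u64', 'f64', 'ptr'):
--             leaf = 8
--         else:
--             leaf = 0
--     elif len(mid) >= 2 and mid[0] == 'bytes':
--         leaf = int(':'.join(mid[1:]))
--     elif len(mid) >= 2 and mid[0] == 'enum':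
--         leaf = 4
--     elif len(mid) >= 2 and mid[0] == 'struct':
--         leaf = 8
--     else:
--         leaf = 0
--     return leaf * mult
-- ===== Notes on version B (the rewrite author's own statement) =====
-- stated objective: alternative
-- what changed: B tokenizes the descriptor once with split(':') and computes the array depth, the count multiplier and the leaf size by index arithmetic on the token list, replacing A's recursive rfind-based string peeling and its size dict with a single pass over tokens and a tuple-membership chain.
import Mathlib
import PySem

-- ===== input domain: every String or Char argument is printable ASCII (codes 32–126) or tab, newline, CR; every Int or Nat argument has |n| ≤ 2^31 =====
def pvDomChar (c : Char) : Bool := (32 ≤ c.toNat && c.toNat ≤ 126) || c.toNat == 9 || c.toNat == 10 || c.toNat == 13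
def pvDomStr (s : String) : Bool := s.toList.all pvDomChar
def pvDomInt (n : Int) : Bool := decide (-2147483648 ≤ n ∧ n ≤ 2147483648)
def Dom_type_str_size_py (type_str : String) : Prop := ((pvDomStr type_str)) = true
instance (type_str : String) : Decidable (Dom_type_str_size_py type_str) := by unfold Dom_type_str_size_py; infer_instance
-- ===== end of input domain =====

-- B tokenizes the descriptor once with split(':') and works on the token list (leading-'arr'
-- count, trailing digit tokens as the multiplier, middle tokens as the leaf), replacing A's
-- recursive rfind-based peeling and dict lookup (objective: alternative algorithm).

-- length bounds used by the termination proof of A's port below (cited in decreasing_by)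
theorem pvSliceLen_le (xs : List Char) (b : Int) :
    (PySem.List.slice xs none (some b)).length ≤ xs.length := by
  rw [← PySem.List.slice_zero_start, PySem.List.length_slice]
  have := PySem.List.clampIdx_le xs.length b
  omega

theorem pvDropLen (xs : List Char) :
    (PySem.List.slice xs (some 4) none).length = xs.length - 4 := by
  rw [PySem.List.slice_from xs (by norm_num : (0:Int) ≤ 4)]
  simp

-- ===== PORT A =====
-- the literal dict of leaf sizes
def pvSizesA : PySem.Dict (List Char) Int :=
  PySem.Dict.mk [("bool".toList, 1), ("i8".toList, 1), ("u8".toList, 1),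
    ("i16".toList, 2), ("u16".toList, 2),
    ("i32".toList, 4), ("u32".toList, 4), ("f32".toList, 4),
    ("i64".toList, 8), ("u64".toList, 8), ("f64".toList, 8),
    ("ptr".toList, 8), ("void".toList, 0)]

-- recursive transliteration of A on the code-point list; where Python's int() would raise
-- ValueError (excluded by Pre_), ofChars? is none and .getD 0 stands in
def pvSizeA (s : List Char) : Int :=
  if PySem.Dict.contains pvSizesA s then (PySem.Dict.get? pvSizesA s).getD 0
  else if PySem.Chars.startswith s "bytes:".toList then
    (PySem.Int.ofChars? (PySem.Chars.slice s (some 6) none)).getD 0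
  else if ha : PySem.Chars.startswith s "arr:".toList then
    let rest := PySem.Chars.slice s (some 4) none
    let last := PySem.Chars.rfind rest [':']
    if h : 0 ≤ last ∧ PySem.Chars.strIsdigit (PySem.Chars.slice rest (some (last + 1)) none) then
      let count := (PySem.Int.ofChars? (PySem.Chars.slice rest (some (last + 1)) none)).getD 0
      let elem_size := pvSizeA (PySem.Chars.slice rest none (some last))
      elem_size * count
    else 0
  else if PySem.Chars.startswith s "enum:".toList then 4
  else if PySem.Chars.startswith s "struct:".toList then 8
  else 0
termination_by s.length
decreasing_by
  have hp : "arr:".toList <+: s := (PySem.Chars.startswith_iff s _).mp ha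
  have h4 : 4 ≤ s.length := by simpa using hp.length_le
  simp only [PySem.Chars.slice_eq_listSlice]
  have k1 := pvSliceLen_le (PySem.List.slice s (some 4) none)
      (PySem.Chars.rfind (PySem.List.slice s (some 4) none) [':'])
  have k2 := pvDropLen s
  omega

def type_str_size_py (type_str : String) : Int := pvSizeA type_str.toList

-- ===== PORT B =====
-- the `while d < n and toks[d] == 'arr'` counting loop, as structural recursion on the tokens
def pvDepth : List (List Char) → Nat
  | [] => 0
  | t :: ts => if t = "arr".toList then pvDepth ts + 1 else 0

-- the `for t in toks[n-d:]` multiplier loop; `none` is the early `return 0`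
def pvMultLoop : List (List Char) → Int → Option Int
  | [], m => some m
  | t :: ts, m =>
    if PySem.Chars.strIsdigit t then pvMultLoop ts (m * (PySem.Int.ofChars? t).getD 0)
    else none

-- the leaf dispatch on the middle tokens (tuple-membership chain, no dict)
def pvLeafTok : List (List Char) → Int
  | [t] =>
    if t ∈ ["bool".toList, "i8".toList, "u8".toList] then 1
    else if t ∈ ["i16".toList, "u16".toList] then 2
    else if t ∈ ["i32".toList, "u32".toList, "f32".toList] then 4
    else if t ∈ ["i64".toList, "u64".toList, "f64".toList, "ptr".toList] then 8
    else 0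
  | t :: rest@(_ :: _) =>
    if t = "bytes".toList then (PySem.Int.ofChars? (PySem.Chars.join [':'] rest)).getD 0
    else if t = "enum".toList then 4
    else if t = "struct".toList then 8
    else 0
  | [] => 0

-- B's body on the token list
def pvTokAlgo (toks : List (List Char)) : Int :=
  let n := toks.length
  let d := pvDepth toks
  if 2 * d > n then 0
  else
    match pvMultLoop (toks.drop (n - d)) 1 with
    | none => 0
    | some m => pvLeafTok ((toks.drop d).take (n - 2 * d)) * m

def type_str_size_py_alt (type_str : String) : Int :=
  pvTokAlgo (PySem.Chars.splitOn type_str.toList [':'])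

-- ===== PRECONDITION & SPEC =====
-- Pre_ excludes exactly the inputs on which Python A raises ValueError: descriptors whose
-- array-peeled leaf is 'bytes:<suffix>' with a suffix int() cannot parse (B raises there too).
def Pre_type_str_size_py (type_str : String) : Prop :=
  ¬ (let ts := PySem.Chars.splitOn type_str.toList [':']
     let e := (ts.takeWhile (fun t => t == "arr".toList)).length
     let n := ts.length
     2 * e ≤ n ∧ (ts.drop (n - e)).all PySem.Chars.strIsdigit = true ∧ 2 ≤ n - 2 * e ∧
       ts[e]? = some "bytes".toList ∧
       (PySem.Int.ofChars? (PySem.Chars.join [':'] ((ts.drop (e + 1)).take (n - 2 * e - 1)))).isNone = true)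
instance (type_str : String) : Decidable (Pre_type_str_size_py type_str) := by
  unfold Pre_type_str_size_py; infer_instance

def pvWitness_type_str_size_py : String := "arr:arr:bytes:12:3:2"

def Spec_type_str_size_py (type_str : String) (out : Int) : Prop := out = type_str_size_py_alt type_str
instance (type_str : String) (out : Int) : Decidable (Spec_type_str_size_py type_str out) := by
  unfold Spec_type_str_size_py; infer_instance

-- ===== CLAIM (what is proved, stated in full; the proofs are below) =====
def Claim_equal_type_str_size_py : Prop := ∀ (type_str : String), Dom_type_str_size_py type_str → Pre_type_str_size_py type_str → Spec_type_str_size_py type_str (type_str_size_py type_str)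

-- ===== LEMMAS AND PROOFS =====

def pvTok : List Char → List (List Char)
  | [] => [[]]
  | c :: t =>
    if c = ':' then [] :: pvTok t
    else match pvTok t with
      | u :: us => (c :: u) :: us
      | [] => [[c]]

theorem pvTok_ne_nil (cs : List Char) : pvTok cs ≠ [] := by
  cases cs with
  | nil => simp [pvTok]
  | cons c t =>
    simp only [pvTok]
    split
    · simp
    · split <;> simp

def pvPrep (p : List Char) : List (List Char) → List (List Char)
  | [] => [p]
  | u :: us => (p ++ u) :: us

theorem pvSplitOn_go_spec : ∀ (fuel : Nat) (l cur : List Char) (acc : List (List Char)),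
    l.length ≤ fuel →
    PySem.Chars.splitOn.go [':'] fuel l cur acc = acc.reverse ++ pvPrep cur.reverse (pvTok l) := by
  intro fuel
  induction fuel with
  | zero =>
    intro l cur acc h
    have : l = [] := by cases l <;> simp_all
    subst this
    simp [PySem.Chars.splitOn.go, pvTok, pvPrep]
  | succ n IH =>
    intro l cur acc h
    cases l with
    | nil => simp [PySem.Chars.splitOn.go, pvTok, pvPrep]
    | cons c rest =>
      by_cases hc : c = ':'
      · subst hc
        rw [PySem.Chars.splitOn.go]
        rw [if_pos (by simp)]
        rw [show List.drop [':'].length (':' :: rest) = rest from rfl]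
        rw [IH rest [] (cur.reverse :: acc) (by simpa using h)]
        obtain ⟨w, ws, hw⟩ := List.exists_cons_of_ne_nil (pvTok_ne_nil rest)
        simp [pvTok, hw, pvPrep]
      · rw [PySem.Chars.splitOn.go]
        rw [if_neg (by simp [Ne.symm hc])]
        rw [IH rest (c :: cur) acc (by simpa using h)]
        obtain ⟨w, ws, hw⟩ := List.exists_cons_of_ne_nil (pvTok_ne_nil rest)
        simp [pvTok, hw, pvPrep, hc]

theorem pvSplitOn_eq_pvTok (cs : List Char) : PySem.Chars.splitOn cs [':'] = pvTok cs := by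
  rw [PySem.Chars.splitOn, pvSplitOn_go_spec (cs.length + 1) cs [] [] (by omega)]
  obtain ⟨w, ws, hw⟩ := List.exists_cons_of_ne_nil (pvTok_ne_nil cs)
  simp [hw, pvPrep]

theorem pvTok_no_colon (u : List Char) (h : ':' ∉ u) : pvTok u = [u] := by
  induction u with
  | nil => simp [pvTok]
  | cons c t IH =>
    have hc : c ≠ ':' := fun e => h (e ▸ List.mem_cons_self ..)
    rw [pvTok]
    rw [if_neg hc, IH (fun e => h (List.mem_cons_of_mem _ e))]

theorem pvTok_last (u v : List Char) (hv : ':' ∉ v) :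
    pvTok (u ++ ':' :: v) = pvTok u ++ [v] := by
  induction u with
  | nil => simp [pvTok, pvTok_no_colon v hv]
  | cons c t IH =>
    by_cases hc : c = ':'
    · subst hc; simp only [List.cons_append, pvTok, IH]; simp
    · simp only [List.cons_append, pvTok, if_neg hc, IH]
      obtain ⟨w, ws, hw⟩ := List.exists_cons_of_ne_nil (pvTok_ne_nil t)
      simp [hw]

theorem pvTok_join (cs : List Char) : PySem.Chars.join [':'] (pvTok cs) = cs := by
  induction cs with
  | nil => rw [show pvTok [] = [[]] from rfl, PySem.Chars.join_singleton]
  | cons c t IH =>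
    obtain ⟨w, ws, hw⟩ := List.exists_cons_of_ne_nil (pvTok_ne_nil t)
    by_cases hc : c = ':'
    · subst hc
      rw [pvTok, if_pos rfl, hw]
      rw [hw] at IH
      rw [PySem.Chars.join_cons_cons]
      simp [IH]
    · rw [pvTok, if_neg hc, hw]
      rw [hw] at IH
      cases ws with
      | nil => simp_all [PySem.Chars.join_singleton]
      | cons y ys =>
        rw [PySem.Chars.join_cons_cons] at *
        simp_all

theorem pvLastColon (t : List Char) (h : ':' ∈ t) :
    ∃ u v, t = u ++ ':' :: v ∧ ':' ∉ v := by
  induction t using List.reverseRecOn with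
  | nil => simp at h
  | append_singleton ys y IH =>
    by_cases hy : y = ':'
    · exact ⟨ys, [], by simp [hy], by simp⟩
    · have : ':' ∈ ys := by
        rcases List.mem_append.mp h with h' | h'
        · exact h'
        · simp at h'; exact absurd h'.symm hy
      obtain ⟨u, v, huv, hv⟩ := IH this
      exact ⟨u, v ++ [y], by simp [huv], by
        intro hm
        rcases List.mem_append.mp hm with h' | h'
        · exact hv h'
        · simp at h'; exact hy h'.symm⟩

-- rfind [':'] characterisation
theorem pvNoPrefix (s : List Char) (h : ':' ∉ s) (i : Nat) :
    [':'].isPrefixOf (s.drop i) = false := by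
  cases hd : s.drop i with
  | nil => simp [List.isPrefixOf]
  | cons c r =>
    have : c ∈ s := List.mem_of_mem_drop (hd ▸ List.mem_cons_self ..)
    have hc : c ≠ ':' := fun e => h (e ▸ this)
    simp [List.isPrefixOf, Ne.symm hc]

theorem pvRfind_go_none (s : List Char) (h : ':' ∉ s) (j : Nat) :
    PySem.Chars.rfind.go s [':'] j = -1 := by
  induction j with
  | zero =>
    rw [PySem.Chars.rfind.go]
    rw [show s = s.drop 0 from rfl, pvNoPrefix s h 0]
    simp
  | succ j IH =>
    rw [PySem.Chars.rfind.go, pvNoPrefix s h (j+1)]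
    simpa using IH

theorem pvRfind_no_colon (s : List Char) (h : ':' ∉ s) : PySem.Chars.rfind s [':'] = -1 := by
  rw [PySem.Chars.rfind]; exact pvRfind_go_none s h s.length

theorem pvNoPrefixAfter (u v : List Char) (hv : ':' ∉ v) (k : Nat) (hk : u.length + 1 ≤ k) :
    [':'].isPrefixOf ((u ++ ':' :: v).drop k) = false := by
  obtain ⟨m, rfl⟩ : ∃ m, k = u.length + (m + 1) := ⟨k - u.length - 1, by omega⟩
  rw [List.drop_length_add_append]
  rw [show (':' :: v).drop (m + 1) = v.drop m from rfl]
  exact pvNoPrefix v hv _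

theorem pvRfind_go_last (u v : List Char) (hv : ':' ∉ v) (j : Nat) (hj : u.length ≤ j) :
    PySem.Chars.rfind.go (u ++ ':' :: v) [':'] j = u.length := by
  induction j with
  | zero =>
    have hu : u = [] := by cases u <;> simp_all
    subst hu
    rw [PySem.Chars.rfind.go]
    simp [List.isPrefixOf]
  | succ j IH =>
    by_cases he : u.length = j + 1
    · rw [PySem.Chars.rfind.go]
      have : (u ++ ':' :: v).drop (j + 1) = ':' :: v := by
        rw [← he]; exact List.drop_left
      rw [this]
      simp [List.isPrefixOf, he]
    · have hj' : u.length ≤ j := by omega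
      rw [PySem.Chars.rfind.go, pvNoPrefixAfter u v hv (j+1) (by omega)]
      simpa using IH hj'

theorem pvRfind_last (u v : List Char) (hv : ':' ∉ v) :
    PySem.Chars.rfind (u ++ ':' :: v) [':'] = u.length := by
  rw [PySem.Chars.rfind]
  exact pvRfind_go_last u v hv _ (by simp)


-- token-list facts for B's body
theorem pvDepth_le_length (ts : List (List Char)) : pvDepth ts ≤ ts.length := by
  induction ts with
  | nil => simp [pvDepth]
  | cons t ts IH => rw [pvDepth]; split <;> simp; omega

theorem pvDepth_append_single (ts : List (List Char)) (v : List Char)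
    (hv : v ≠ "arr".toList) : pvDepth (ts ++ [v]) = pvDepth ts := by
  induction ts with
  | nil => simp only [List.nil_append, pvDepth, if_neg hv]
  | cons t ts IH => simp only [List.cons_append, pvDepth, IH]

theorem pvMultLoop_append (xs : List (List Char)) (v : List Char)
    (hv : PySem.Chars.strIsdigit v = true) (m : Int) :
    pvMultLoop (xs ++ [v]) m = (pvMultLoop xs m).map (· * (PySem.Int.ofChars? v).getD 0) := by
  induction xs generalizing m with
  | nil => simp [pvMultLoop, hv]
  | cons t ts IH =>
    simp only [List.cons_append, pvMultLoop]
    split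
    · exact IH _
    · rfl

theorem pvMultLoop_none (xs : List (List Char)) (v : List Char) (hm : v ∈ xs)
    (hv : PySem.Chars.strIsdigit v = false) (m : Int) : pvMultLoop xs m = none := by
  induction xs generalizing m with
  | nil => simp at hm
  | cons t ts IH =>
    rw [pvMultLoop]
    rcases List.mem_cons.mp hm with rfl | hm'
    · simp [hv]
    · split
      · exact IH hm' _
      · rfl

-- B's body on 'arr' :: us ++ [digit count]
theorem pvTokAlgo_arr_digit (us : List (List Char)) (v : List Char)
    (hv : PySem.Chars.strIsdigit v = true) :
    pvTokAlgo ("arr".toList :: us ++ [v]) = pvTokAlgo us * (PySem.Int.ofChars? v).getD 0 := by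
  have hvarr : v ≠ "arr".toList := by
    rintro rfl; revert hv; decide
  have he := pvDepth_le_length us
  set e := pvDepth us with hedef
  set m := us.length with hmdef
  have hd : pvDepth ("arr".toList :: us ++ [v]) = e + 1 := by
    rw [show ("arr".toList :: us ++ [v]) = "arr".toList :: (us ++ [v]) from rfl, pvDepth,
      if_pos rfl, pvDepth_append_single us v hvarr]
  have hn : ("arr".toList :: us ++ [v]).length = m + 2 := by simp; omega
  by_cases hc : 2 * e > m
  · rw [pvTokAlgo, pvTokAlgo]
    simp only [hd, hn, ← hedef, ← hmdef]
    rw [if_pos (by omega), if_pos (by omega)]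
    ring
  · rw [pvTokAlgo, pvTokAlgo]
    simp only [hd, hn, ← hedef, ← hmdef]
    rw [if_neg (by omega), if_neg (by omega)]
    have hdrop : ("arr".toList :: us ++ [v]).drop (m + 2 - (e + 1)) =
        us.drop (m - e) ++ [v] := by
      rw [show m + 2 - (e + 1) = (m - e) + 1 from by omega,
        show ("arr".toList :: us ++ [v]).drop ((m - e) + 1) = (us ++ [v]).drop (m - e) from rfl,
        List.drop_append_of_le_length (by omega)]
    have hmid : (("arr".toList :: us ++ [v]).drop (e + 1)).take (m + 2 - 2 * (e + 1)) =
        (us.drop e).take (m - 2 * e) := by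
      rw [show ("arr".toList :: us ++ [v]).drop (e + 1) = (us ++ [v]).drop e from rfl,
        List.drop_append_of_le_length (by omega),
        show m + 2 - 2 * (e + 1) = m - 2 * e from by omega,
        List.take_append_of_le_length (by simp; omega)]
    rw [hdrop, hmid, pvMultLoop_append _ _ hv]
    cases pvMultLoop (us.drop (m - e)) 1 with
    | none => simp
    | some mm => simp; ring


theorem pvTokAlgo_arr_nondigit (us : List (List Char)) (v : List Char)
    (hv : PySem.Chars.strIsdigit v = false) :
    pvTokAlgo ("arr".toList :: us ++ [v]) = 0 := by
  rw [pvTokAlgo]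
  split
  · rfl
  · have hd1 : 1 ≤ pvDepth ("arr".toList :: us ++ [v]) := by
      rw [show ("arr".toList :: us ++ [v]) = "arr".toList :: (us ++ [v]) from rfl, pvDepth,
        if_pos rfl]
      omega
    have hdle := pvDepth_le_length ("arr".toList :: us ++ [v])
    have hvmem : v ∈ ("arr".toList :: us ++ [v]).drop
        (("arr".toList :: us ++ [v]).length - pvDepth ("arr".toList :: us ++ [v])) := by
      have hlen : ("arr".toList :: us ++ [v]).length = us.length + 2 := by simp
      rw [show ("arr".toList :: us ++ [v]) = ("arr".toList :: us) ++ [v] from rfl,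
        List.drop_append_of_le_length (by simp only [List.length_cons, List.length_append, List.length_nil]; omega)]
      simp
    rw [pvMultLoop_none _ v hvmem hv]


-- when the first token is not 'arr', B's body is just the leaf dispatch
theorem pvTokAlgo_leaf (t0 : List Char) (ts : List (List Char)) (h : t0 ≠ "arr".toList) :
    pvTokAlgo (t0 :: ts) = pvLeafTok (t0 :: ts) := by
  rw [pvTokAlgo]
  have hd : pvDepth (t0 :: ts) = 0 := by rw [pvDepth, if_neg h]
  simp only [hd]
  rw [if_neg (by omega)]
  simp only [Nat.sub_zero, List.drop_length, Nat.mul_zero, List.drop_zero, List.take_length]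
  rw [show pvMultLoop [] 1 = some 1 from rfl]
  exact mul_one _

-- the main equivalence: A's recursion equals B's body on the tokens
theorem pvMain : ∀ (n : Nat) (cs : List Char), cs.length ≤ n →
    pvSizeA cs = pvTokAlgo (pvTok cs) := by
  intro n
  induction n with
  | zero =>
    intro cs h
    have hnil : cs = [] := by cases cs <;> simp_all
    subst hnil
    rw [pvSizeA]
    decide
  | succ n IH =>
    intro cs hlen
    by_cases hdict : PySem.Dict.contains pvSizesA cs = true
    · -- dict case: cs is one of the 13 literal keys
      rw [PySem.Dict.contains_eq_decide_mem_keys] at hdict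
      simp only [pvSizesA, PySem.Dict.keys_mk, decide_eq_true_eq, List.map_cons, List.map_nil,
        List.mem_cons] at hdict
      rcases hdict with rfl|rfl|rfl|rfl|rfl|rfl|rfl|rfl|rfl|rfl|rfl|rfl|rfl|hx
      all_goals first
      | (rw [pvSizeA]; decide)
      | exact absurd hx (by simp)
    · by_cases hbytes : PySem.Chars.startswith cs "bytes:".toList = true
      · obtain ⟨r, rfl⟩ := (PySem.Chars.startswith_iff cs _).mp hbytes
        obtain ⟨w, ws, hw⟩ := List.exists_cons_of_ne_nil (pvTok_ne_nil r)
        have ht : pvTok ("bytes:".toList ++ r) = "bytes".toList :: w :: ws := by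
          simp [pvTok, hw]
        have hjoin : PySem.Chars.join [':'] (w :: ws) = r := by rw [← hw]; exact pvTok_join r
        rw [pvSizeA, if_neg hdict, if_pos hbytes, ht, pvTokAlgo_leaf _ _ (by decide)]
        simp only [PySem.Chars.slice_eq_listSlice]
        rw [PySem.List.slice_from _ (by norm_num : (0:Int) ≤ 6),
          show ((6:Int)).toNat = ("bytes:".toList).length from rfl, List.drop_left]
        simp [pvLeafTok, hjoin]
      · by_cases harr : PySem.Chars.startswith cs "arr:".toList = true
        · obtain ⟨t, rfl⟩ := (PySem.Chars.startswith_iff cs _).mp harr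
          have hrest : PySem.Chars.slice ("arr:".toList ++ t) (some 4) none = t := by
            simp only [PySem.Chars.slice_eq_listSlice]
            rw [PySem.List.slice_from _ (by norm_num : (0:Int) ≤ 4),
              show ((4:Int)).toNat = ("arr:".toList).length from rfl, List.drop_left]
          have htok : pvTok ("arr:".toList ++ t) = "arr".toList :: pvTok t := by
            obtain ⟨w, ws, hw⟩ := List.exists_cons_of_ne_nil (pvTok_ne_nil t)
            simp [pvTok, hw]
          rw [pvSizeA, if_neg hdict, if_neg hbytes, dif_pos harr, hrest, htok]
          dsimp only
          by_cases hc : ':' ∈ t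
          · obtain ⟨u, v, rfl, hv⟩ := pvLastColon t hc
            have hrf : PySem.Chars.rfind (u ++ ':' :: v) [':'] = u.length := pvRfind_last u v hv
            rw [hrf]
            have hsuf : PySem.Chars.slice (u ++ ':' :: v) (some ((u.length : Int) + 1)) none
                = v := by
              simp only [PySem.Chars.slice_eq_listSlice]
              rw [show ((u.length : Int) + 1) = ((u.length + 1 : Nat) : Int) from by push_cast; ring,
                PySem.List.slice_from_natCast]
              exact List.drop_length_add_append 1
            have hpre : PySem.Chars.slice (u ++ ':' :: v) none (some (u.length : Int)) = u := by
              simp only [PySem.Chars.slice_eq_listSlice]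
              rw [PySem.List.slice_to_natCast]
              exact List.take_left
            rw [hsuf, hpre, pvTok_last u v hv]
            by_cases hdig : PySem.Chars.strIsdigit v = true
            · rw [dif_pos ⟨by positivity, hdig⟩, ← List.cons_append,
                pvTokAlgo_arr_digit (pvTok u) v hdig]
              have hu : u.length ≤ n := by
                have := hlen; simp [List.length_append] at this; omega
              rw [IH u hu]
            · have hdig' : PySem.Chars.strIsdigit v = false := by
                simpa using hdig
              rw [dif_neg (by rintro ⟨_, h2⟩; exact hdig (by exact h2)), ← List.cons_append,
                pvTokAlgo_arr_nondigit (pvTok u) v hdig']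
          · rw [pvRfind_no_colon t hc, pvTok_no_colon t hc]
            rw [dif_neg (by rintro ⟨h1, _⟩; omega)]
            by_cases htarr : t = "arr".toList
            · subst htarr; decide
            · have htarr' : ¬ t = ['a', 'r', 'r'] := by simpa using htarr
              by_cases hdt : PySem.Chars.strIsdigit t = true
              · simp [pvTokAlgo, pvDepth, htarr', hdt, pvMultLoop, pvLeafTok]
              · simp [pvTokAlgo, pvDepth, htarr', pvMultLoop,
                  (by simpa using hdt : PySem.Chars.strIsdigit t = false)]
        · by_cases henum : PySem.Chars.startswith cs "enum:".toList = true
          · obtain ⟨r, rfl⟩ := (PySem.Chars.startswith_iff cs _).mp henum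
            obtain ⟨w, ws, hw⟩ := List.exists_cons_of_ne_nil (pvTok_ne_nil r)
            have ht : pvTok ("enum:".toList ++ r) = "enum".toList :: w :: ws := by
              simp [pvTok, hw]
            rw [pvSizeA, if_neg hdict, if_neg hbytes, dif_neg harr, if_pos henum, ht,
              pvTokAlgo_leaf _ _ (by decide)]
            simp [pvLeafTok]
          · by_cases hstruct : PySem.Chars.startswith cs "struct:".toList = true
            · obtain ⟨r, rfl⟩ := (PySem.Chars.startswith_iff cs _).mp hstruct
              obtain ⟨w, ws, hw⟩ := List.exists_cons_of_ne_nil (pvTok_ne_nil r)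
              have ht : pvTok ("struct:".toList ++ r) = "struct".toList :: w :: ws := by
                simp [pvTok, hw]
              rw [pvSizeA, if_neg hdict, if_neg hbytes, dif_neg harr, if_neg henum,
                if_pos hstruct, ht, pvTokAlgo_leaf _ _ (by decide)]
              simp [pvLeafTok]
            · -- default case
              rw [pvSizeA, if_neg hdict, if_neg hbytes, dif_neg harr, if_neg henum,
                if_neg hstruct]
              by_cases hc : ':' ∈ cs
              · obtain ⟨u, v, rfl, hv⟩ := pvLastColon cs hc
                obtain ⟨w, ws, hw⟩ := List.exists_cons_of_ne_nil (pvTok_ne_nil u)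
                have hu : u = PySem.Chars.join [':'] (w :: ws) := by rw [← hw, pvTok_join]
                have hcs : ∃ z, u ++ ':' :: v = w ++ ':' :: z := by
                  cases ws with
                  | nil => exact ⟨v, by simp [hu, PySem.Chars.join_singleton]⟩
                  | cons y ys =>
                    refine ⟨PySem.Chars.join [':'] (y :: ys) ++ ':' :: v, ?_⟩
                    rw [hu, PySem.Chars.join_cons_cons]
                    simp
                obtain ⟨z, hz⟩ := hcs
                have hwpre : ∀ p : List Char, w = p →
                    PySem.Chars.startswith (u ++ ':' :: v) (p ++ [':']) = true := by
                  rintro p rfl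
                  rw [PySem.Chars.startswith_iff, hz]
                  exact ⟨z, by simp⟩
                have hwarr : w ≠ "arr".toList := fun he =>
                  harr (by simpa using hwpre _ he)
                have hwbytes : w ≠ "bytes".toList := fun he =>
                  hbytes (by simpa using hwpre _ he)
                have hwenum : w ≠ "enum".toList := fun he =>
                  henum (by simpa using hwpre _ he)
                have hwstruct : w ≠ "struct".toList := fun he =>
                  hstruct (by simpa using hwpre _ he)
                rw [pvTok_last u v hv, hw, show (w :: ws) ++ [v] = w :: (ws ++ [v]) from rfl,
                  pvTokAlgo_leaf _ _ hwarr]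
                obtain ⟨q, qs, hq⟩ := List.exists_cons_of_ne_nil
                  (show ws ++ [v] ≠ [] by simp)
                rw [hq, pvLeafTok]
                rw [if_neg hwbytes, if_neg hwenum, if_neg hwstruct]
              · rw [pvTok_no_colon cs hc]
                by_cases hcarr : cs = "arr".toList
                · subst hcarr; decide
                · rw [pvTokAlgo_leaf _ _ hcarr, pvLeafTok]
                  have hmem : ∀ L : List (List Char),
                      (∀ x ∈ L, PySem.Dict.contains pvSizesA x = true) → cs ∉ L :=
                    fun _ hL hm => hdict (hL cs hm)
                  rw [if_neg (hmem _ (by decide)), if_neg (hmem _ (by decide)),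
                    if_neg (hmem _ (by decide)), if_neg (hmem _ (by decide))]

-- ===== VERDICT (by name: the statement is the Claim_ definition above) =====
theorem type_str_size_py_spec : Claim_equal_type_str_size_py := by
  intro s _ _
  unfold Spec_type_str_size_py type_str_size_py type_str_size_py_alt
  rw [pvSplitOn_eq_pvTok, pvMain s.toList.length s.toList le_rfl]
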